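-- pv_equiv track=rewrite | github.com/eridangs/Bee_crowd_ex | 1973.py | roubocarneiros
-- ===== SOURCE A (Python) =====
-- def roubocarneiros(N_fazendas:int, lista:list):
--     if len(lista) == 1: # quando só tem 1 fazenda
--         carneirosroubados = 1
--         fazendasroubadas = 1
--     else: #mais de 1 fazenda e necessita verificação se é impar ou par
--         carneirosroubados = 0
--         fazendasroubadas = 0
--         for i in range(N_fazendas):
--             if lista[i] % 2 != 0: #carneiros em numero impar
--                 fazendasroubadas += 1
--                 carneirosroubados += 1
--             else:  #carneiros em numero par
--                 fazendasroubadas += 1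
--                 if lista[0] != 1:
--                     carneirosroubados += 1
--                 for j in range(i-1,-1,-1):
--                     carneirosroubados += 1
--                 break
--     return fazendasroubadas, carneirosroubados
-- ===== SOURCE B (Python) =====
-- def roubocarneiros(N_fazendas: int, lista: list):
--     if len(lista) == 1:  # single farm: fixed answer
--         return (1, 1)
--     for k in range(N_fazendas):
--         if lista[k] % 2 == 0:  # first even farm: closed-form count
--             return (k + 1, 2 * k + (1 if lista[0] != 1 else 0))
--     return (N_fazendas, N_fazendas)  # every farm scanned had an odd count
-- ===== Notes on version B (the rewrite author's own statement) =====
-- stated objective: simpler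
-- what changed: The nested inner counting loop and running accumulators are replaced by a single scan for the first even element and a closed-form pair (k+1, 2*k + adjustment); Pre_ excludes negative farm counts, which lie outside the task's natural domain of nonnegative counts, and the inputs where A raises IndexError.
-- outside the precondition, e.g. on roubocarneiros(-2, [3, 5]): A returns (0, 0), B returns (-2, -2)
import Mathlib
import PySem

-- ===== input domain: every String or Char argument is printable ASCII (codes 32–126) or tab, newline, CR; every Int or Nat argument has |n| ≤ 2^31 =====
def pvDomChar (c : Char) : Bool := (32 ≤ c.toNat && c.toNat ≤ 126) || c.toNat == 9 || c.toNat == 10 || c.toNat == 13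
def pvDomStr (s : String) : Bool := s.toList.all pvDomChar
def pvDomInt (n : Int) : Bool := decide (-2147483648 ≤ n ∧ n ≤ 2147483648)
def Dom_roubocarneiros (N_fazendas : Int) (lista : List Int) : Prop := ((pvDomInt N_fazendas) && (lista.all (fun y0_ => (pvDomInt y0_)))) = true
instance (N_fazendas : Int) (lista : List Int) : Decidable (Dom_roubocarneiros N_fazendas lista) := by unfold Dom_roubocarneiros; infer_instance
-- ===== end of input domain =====

-- B replaces A's accumulator loop with nested backward counting loop by a single scan for the
-- first even element and a closed-form answer (simpler; same asymptotic cost).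

-- ===== PORT A =====
-- the for-loop 'for i in range(N_fazendas)': fuel = remaining iterations, i = current index,
-- state (fazendasroubadas, carneirosroubados); pyGet? = none is Python's IndexError
-- (excluded by Pre_); (0, 0) there is an arbitrary value.
def pvALoop (lista : List Int) : Nat → Int → Int → Int → Int × Int
  | 0, _, faz, car => (faz, car)
  | fuel + 1, i, faz, car =>
    match PySem.List.pyGet? lista i with
    | none => (0, 0)
    | some v =>
      if PySem.Int.mod v 2 ≠ 0 then
        pvALoop lista fuel (i + 1) (faz + 1) (car + 1)
      else
        -- fazendasroubadas += 1; if lista[0] != 1: carneiros += 1; for j in range(i-1,-1,-1): carneiros += 1; break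
        (faz + 1,
         (PySem.List.pyRange (i - 1) (-1) (-1)).foldl (fun c _ => c + 1)
           (car + (if PySem.List.pyGetD lista 0 0 ≠ 1 then 1 else 0)))

def roubocarneiros (N_fazendas : Int) (lista : List Int) : Int × Int :=
  if PySem.List.len lista = 1 then (1, 1)
  else pvALoop lista N_fazendas.toNat 0 0 0

-- ===== PORT B =====
-- scan 'for k in range(N_fazendas)' for the first even farm (fuel = remaining iterations,
-- k = current index); closed-form result there; (N, N) when every scanned farm is odd
-- (pyGet? none = IndexError, arbitrary (0, 0))
def pvBScan (lista : List Int) (N : Int) : Nat → Int → Int × Int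
  | 0, _ => (N, N)
  | fuel + 1, k =>
    match PySem.List.pyGet? lista k with
    | none => (0, 0)
    | some v =>
      if PySem.Int.mod v 2 = 0 then
        (k + 1, 2 * k + (if PySem.List.pyGetD lista 0 0 ≠ 1 then 1 else 0))
      else pvBScan lista N fuel (k + 1)

def roubocarneiros_alt (N_fazendas : Int) (lista : List Int) : Int × Int :=
  if PySem.List.len lista = 1 then (1, 1)
  else pvBScan lista N_fazendas N_fazendas.toNat 0

-- ===== PRECONDITION & SPEC =====
-- Pre_ excludes negative farm counts, which lie outside the task's natural domain (a farm
-- count is nonnegative), and the inputs where A raises IndexError (len(lista) ≠ 1,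
-- N_fazendas > len(lista) and no element of lista is even: the scan runs off the end).
def Pre_roubocarneiros (N_fazendas : Int) (lista : List Int) : Prop :=
  lista.length = 1 ∨
    (0 ≤ N_fazendas ∧
      (N_fazendas ≤ (lista.length : Int) ∨ ∃ x ∈ lista, PySem.Int.mod x 2 = 0))
instance (N_fazendas : Int) (lista : List Int) : Decidable (Pre_roubocarneiros N_fazendas lista) := by unfold Pre_roubocarneiros; infer_instance

def pvWitness_roubocarneiros : Int × List Int := (3, [3, 5, 2])

def Spec_roubocarneiros (N_fazendas : Int) (lista : List Int) (out : Int × Int) : Prop := out = roubocarneiros_alt N_fazendas lista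
instance (N_fazendas : Int) (lista : List Int) (out : Int × Int) : Decidable (Spec_roubocarneiros N_fazendas lista out) := by unfold Spec_roubocarneiros; infer_instance

-- ===== CLAIM (what is proved, stated in full; the proofs are below) =====
def Claim_equal_roubocarneiros : Prop := ∀ (N_fazendas : Int) (lista : List Int), Dom_roubocarneiros N_fazendas lista → Pre_roubocarneiros N_fazendas lista → Spec_roubocarneiros N_fazendas lista (roubocarneiros N_fazendas lista)

-- ===== LEMMAS AND PROOFS =====

-- A's loop with faz = car = current index c equals B's scan from the same point.
lemma pvLoop_eq (lista : List Int) (N : Int) :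
    ∀ (fuel : Nat) (c : Int), 0 ≤ c → (fuel : Int) + c = N →
    pvALoop lista fuel c c c = pvBScan lista N fuel c := by
  intro fuel
  induction fuel with
  | zero =>
    intro c hc0 hcm
    have : c = N := by omega
    simp [pvALoop, pvBScan, this]
  | succ fuel ih =>
    intro c hc0 hcm
    simp only [pvALoop, pvBScan]
    cases hg : PySem.List.pyGet? lista c with
    | none => rfl
    | some v =>
      by_cases hv : PySem.Int.mod v 2 = 0
      · have hdvd : (2 : Int) ∣ v := (PySem.Int.mod_eq_zero_iff_dvd v 2).mp hv
        simp [hdvd]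
        -- the inner backward loop adds 1 per element; range(c-1,-1,-1) has c elements
        rw [PySem.List.foldl_add (g := fun _ => (1 : Int)), PySem.List.sum_map_const_int,
          PySem.List.length_pyRange_neg_one]
        generalize (if PySem.List.pyGetD lista 0 0 = 1 then (0 : Int) else 1) = adj
        omega
      · simp only [hv, ite_not]
        simp
        exact ih (c + 1) (by omega) (by omega)

-- ===== VERDICT (by name: the statement is the Claim_ definition above) =====
theorem roubocarneiros_spec : Claim_equal_roubocarneiros := by
  intro N lista _hD hP
  unfold Spec_roubocarneiros roubocarneiros roubocarneiros_alt
  by_cases h1 : lista.length = 1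
  · simp [PySem.List.len_eq, h1]
  · have h1' : ¬ (PySem.List.len lista = 1) := by
      simpa [PySem.List.len_eq] using h1
    have hN : 0 ≤ N := by
      rcases hP with h | ⟨h, _⟩
      · exact absurd h h1
      · exact h
    rw [if_neg h1', if_neg h1']
    exact pvLoop_eq lista N N.toNat 0 le_rfl (by omega)
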